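-- pv_equiv track=rewrite | github.com/kbvanzomeren/AoC | 2016/day7.py | has_aba
-- ===== SOURCE A (Python) =====
-- def has_aba(items, hyper=[], level=0, m1=None, m2=None):
--     _has_aba = False
--     aba_in_hype = False
--
--     for item in items:
--         for c1, c2, c3 in zip(item[:-2], item[1:-1], item[2:]):
--             if c1 == c3 and c1 != c2:
--                 if level == 0:
--                     return True
--                 elif level == 1:
--                     if has_aba(hyper, level=2, m1=c1, m2=c2):
--                         _has_aba = True
--                 elif level == 2:
--                     if c1 == m2 and c2 == m1:
--                         return True
--     if aba_in_hype:
--         return False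
--
--     return _has_aba
-- ===== SOURCE B (Python) =====
-- def has_aba(items, hyper=[], level=0, m1=None, m2=None):
--     def aba_pairs(strings):
--         return {(a, b)
--                 for s in strings
--                 for a, b, c in zip(s, s[1:], s[2:])
--                 if a == c and a != b}
--
--     pairs = aba_pairs(items)
--     if level == 0:
--         return bool(pairs)
--     if level == 1:
--         hyper_pairs = aba_pairs(hyper)
--         return any((b, a) in hyper_pairs for a, b in pairs)
--     if level == 2:
--         return (m2, m1) in pairs
--     return False
-- ===== Notes on version B (the rewrite author's own statement) =====
-- stated objective: simpler
-- what changed: Replaces A's recursive nested-loop scan with two independent passes that build sets of ABA pairs from items and hyper, then a non-recursive level dispatch using set non-emptiness / membership (level 1 becomes an intersection-style membership check instead of a recursive call per triple).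
import Mathlib
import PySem

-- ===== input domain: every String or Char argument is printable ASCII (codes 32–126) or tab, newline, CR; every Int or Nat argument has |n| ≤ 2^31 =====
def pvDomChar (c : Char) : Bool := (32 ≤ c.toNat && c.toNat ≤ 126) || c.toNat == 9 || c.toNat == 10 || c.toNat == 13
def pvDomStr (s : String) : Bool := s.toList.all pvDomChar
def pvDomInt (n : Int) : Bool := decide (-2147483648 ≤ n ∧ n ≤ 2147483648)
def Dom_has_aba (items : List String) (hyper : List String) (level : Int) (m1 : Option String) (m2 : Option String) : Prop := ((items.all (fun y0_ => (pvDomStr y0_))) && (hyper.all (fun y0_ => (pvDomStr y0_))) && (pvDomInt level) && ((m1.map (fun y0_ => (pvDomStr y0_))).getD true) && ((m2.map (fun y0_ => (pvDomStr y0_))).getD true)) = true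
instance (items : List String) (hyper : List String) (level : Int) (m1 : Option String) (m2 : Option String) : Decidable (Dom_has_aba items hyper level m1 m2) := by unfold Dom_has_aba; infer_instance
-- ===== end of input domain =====

-- B replaces A's recursive nested-loop scan by two independent set-building passes
-- (ABA pairs of items, ABA pairs of hyper) followed by a non-recursive level dispatch
-- on set emptiness/membership; objective: simpler.

-- ===== PORT A =====
-- zip(item[:-2], item[1:-1], item[2:]) as a list of ((c1, c2), c3)
def aTriples (s : String) : List ((Char × Char) × Char) :=
  (List.zip (PySem.List.slice s.toList none (some (-2)))
      (PySem.List.slice s.toList (some 1) (some (-1)))).zip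
    (PySem.List.slice s.toList (some 2) none)

-- the inner 'for c1, c2, c3 in zip(...)' loop; Except.error b = an early 'return b',
-- Except.ok acc = fall through with the current _has_aba.  'rec2 c1 c2' stands for the
-- recursive call has_aba(hyper, level=2, m1=c1, m2=c2) (passed in, see has_aba below).
def aTripLoop (rec2 : Char → Char → Bool) (level : Int) (m1 : Option String) (m2 : Option String) :
    List ((Char × Char) × Char) → Bool → Except Bool Bool
  | [], acc => .ok acc
  | ((c1, c2), c3) :: ts, acc =>
    if c1 == c3 && !(c1 == c2) then
      if level == 0 then .error true
      else if level == 1 then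
        if rec2 c1 c2 then aTripLoop rec2 level m1 m2 ts true
        else aTripLoop rec2 level m1 m2 ts acc
      else if level == 2 then
        if some (String.ofList [c1]) == m2 && some (String.ofList [c2]) == m1 then .error true
        else aTripLoop rec2 level m1 m2 ts acc
      else aTripLoop rec2 level m1 m2 ts acc
    else aTripLoop rec2 level m1 m2 ts acc

-- the outer 'for item in items' loop
def aItemLoop (rec2 : Char → Char → Bool) (level : Int) (m1 : Option String) (m2 : Option String) :
    List String → Bool → Except Bool Bool
  | [], acc => .ok acc
  | s :: ss, acc =>
    match aTripLoop rec2 level m1 m2 (aTriples s) acc with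
    | .error b => .error b
    | .ok acc' => aItemLoop rec2 level m1 m2 ss acc'

def has_abaGo (rec2 : Char → Char → Bool) (items : List String) (_hyper : List String)
    (level : Int) (m1 : Option String) (m2 : Option String) : Bool :=
  match aItemLoop rec2 level m1 m2 items false with
  | .error b => b
  | .ok acc =>
    let aba_in_hype := false        -- A sets this variable and never changes it
    if aba_in_hype then false else acc

-- A's self-recursion happens only from level 1, calling itself at level 2, which makes no
-- further call: the depth-2 call chain is written out (a totality device, same computation;
-- the innermost rec2 is never consulted because the callee runs at level 2).
def has_aba (items : List String) (hyper : List String) (level : Int)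
    (m1 : Option String) (m2 : Option String) : Bool :=
  has_abaGo
    (fun c1 c2 =>
      has_abaGo (fun _ _ => false) hyper [] 2 (some (String.ofList [c1])) (some (String.ofList [c2])))
    items hyper level m1 m2

-- ===== PORT B =====
-- zip(s, s[1:], s[2:]) as a list of ((a, b), c)
def bTriples (s : String) : List ((Char × Char) × Char) :=
  (List.zip s.toList (PySem.List.slice s.toList (some 1) none)).zip
    (PySem.List.slice s.toList (some 2) none)

-- the set comprehension {(a, b) for s in strings for a, b, c in zip(s, s[1:], s[2:]) if a == c and a != b}
def abaPairList (strings : List String) : List (String × String) :=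
  strings.flatMap (fun s =>
    (bTriples s).filterMap (fun t =>
      if t.1.1 == t.2 && !(t.1.1 == t.1.2) then
        some (String.ofList [t.1.1], String.ofList [t.1.2])
      else none))

def abaPairs (strings : List String) : PySem.Set (String × String) :=
  PySem.Set.ofList (abaPairList strings)

def has_aba_alt (items : List String) (hyper : List String) (level : Int)
    (m1 : Option String) (m2 : Option String) : Bool :=
  let pairs := abaPairs items
  if level == 0 then !pairs.isEmpty
  else if level == 1 then
    let hyperPairs := abaPairs hyper
    pairs.any (fun p => PySem.Set.contains hyperPairs (p.2, p.1))
  else if level == 2 then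
    -- (m2, m1) in pairs: pairs holds only pairs of one-char strings, None matches nothing
    match m2, m1 with
    | some a, some b => PySem.Set.contains pairs (a, b)
    | _, _ => false
  else false

-- ===== PRECONDITION & SPEC =====
def Spec_has_aba (items : List String) (hyper : List String) (level : Int) (m1 : Option String) (m2 : Option String) (out : Bool) : Prop := out = has_aba_alt items hyper level m1 m2
instance (items : List String) (hyper : List String) (level : Int) (m1 : Option String) (m2 : Option String) (out : Bool) : Decidable (Spec_has_aba items hyper level m1 m2 out) := by unfold Spec_has_aba; infer_instance

-- ===== CLAIM (what is proved, stated in full; the proofs are below) =====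
def Claim_equal_has_aba : Prop := ∀ (items : List String) (hyper : List String) (level : Int) (m1 : Option String) (m2 : Option String), Dom_has_aba items hyper level m1 m2 → Spec_has_aba items hyper level m1 m2 (has_aba items hyper level m1 m2)

-- ===== LEMMAS AND PROOFS =====

def condT (t : (Char × Char) × Char) : Bool := t.1.1 == t.2 && !(t.1.1 == t.1.2)

-- zip truncates to the shorter list: taking at least the other list's length changes nothing
theorem zip_take_left {α β : Type} (a : List α) (b : List β) (n : Nat) (h : b.length ≤ n) :
    (a.take n).zip b = a.zip b := by
  induction a generalizing b n with
  | nil => simp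
  | cons x a ih =>
    cases b with
    | nil => simp
    | cons y b =>
      cases n with
      | zero => simp at h
      | succ n => simp_all [List.zip]

-- the two triple lists coincide
theorem triples_eq (s : String) : aTriples s = bTriples s := by
  unfold aTriples bTriples
  generalize s.toList = l
  have h1 : PySem.List.slice l none (some (-2)) = l.take (l.length - 2) :=
    PySem.List.slice_to_neg_ofNat l 2 (by omega)
  have h2 : PySem.List.slice l (some 1) (some (-1)) = (l.drop 1).take (l.length - 2) := by
    simp [PySem.List.slice]
    cases l with
    | nil => simp
    | cons c t => simp
  have h3 : PySem.List.slice l (some 2) none = l.drop 2 := by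
    rw [PySem.List.slice_from _ (by norm_num)]
    rfl
  have h4 : PySem.List.slice l (some 1) none = l.tail := PySem.List.slice_from_one l
  rw [h1, h2, h3, h4, ← List.drop_one]
  have h5 : (l.take (l.length - 2)).zip ((l.drop 1).take (l.length - 2)) =
      (l.zip (l.drop 1)).take (l.length - 2) := (List.take_zipWith ..).symm
  rw [h5]
  exact zip_take_left _ _ _ (by simp)

-- ----- characterizations of A's loops, one per level -----

theorem aTripLoop_zero (r : Char → Char → Bool) (m1 m2 : Option String)
    (ts : List ((Char × Char) × Char)) (acc : Bool) :
    aTripLoop r 0 m1 m2 ts acc =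
      if ts.any condT then .error true else .ok acc := by
  induction ts generalizing acc with
  | nil => simp [aTripLoop]
  | cons t ts ih =>
    obtain ⟨⟨c1, c2⟩, c3⟩ := t
    by_cases hc : (c1 == c3 && !(c1 == c2)) = true
    · simp [aTripLoop, hc, condT]
    · simp [aTripLoop, hc, condT, ih]

theorem aTripLoop_one (r : Char → Char → Bool) (m1 m2 : Option String)
    (ts : List ((Char × Char) × Char)) (acc : Bool) :
    aTripLoop r 1 m1 m2 ts acc =
      .ok (acc || ts.any (fun t => condT t && r t.1.1 t.1.2)) := by
  induction ts generalizing acc with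
  | nil => simp [aTripLoop]
  | cons t ts ih =>
    obtain ⟨⟨c1, c2⟩, c3⟩ := t
    by_cases hc : (c1 == c3 && !(c1 == c2)) = true
    · cases hr : r c1 c2 <;>
        simp [aTripLoop, hc, hr, condT, ih]
    · simp [aTripLoop, hc, condT, ih]

theorem aTripLoop_two (r : Char → Char → Bool) (m1 m2 : Option String)
    (ts : List ((Char × Char) × Char)) (acc : Bool) :
    aTripLoop r 2 m1 m2 ts acc =
      if ts.any (fun t => condT t &&
          (some (String.ofList [t.1.1]) == m2 && some (String.ofList [t.1.2]) == m1)) then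
        .error true
      else .ok acc := by
  induction ts generalizing acc with
  | nil => simp [aTripLoop]
  | cons t ts ih =>
    obtain ⟨⟨c1, c2⟩, c3⟩ := t
    by_cases hc : (c1 == c3 && !(c1 == c2)) = true
    · by_cases hm : (some (String.ofList [c1]) == m2 && some (String.ofList [c2]) == m1) = true <;>
        simp [aTripLoop, hc, hm, condT, ih]
    · simp [aTripLoop, hc, condT, ih]

theorem aTripLoop_other (r : Char → Char → Bool) (level : Int) (m1 m2 : Option String)
    (h0 : level ≠ 0) (h1 : level ≠ 1) (h2 : level ≠ 2)
    (ts : List ((Char × Char) × Char)) (acc : Bool) :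
    aTripLoop r level m1 m2 ts acc = .ok acc := by
  induction ts generalizing acc with
  | nil => simp [aTripLoop]
  | cons t ts ih =>
    obtain ⟨⟨c1, c2⟩, c3⟩ := t
    by_cases hc : (c1 == c3 && !(c1 == c2)) = true <;>
      simp [aTripLoop, hc, h0, h1, h2, ih]

-- ----- the outer loop -----

theorem aItemLoop_zero (r : Char → Char → Bool) (m1 m2 : Option String)
    (ss : List String) (acc : Bool) :
    aItemLoop r 0 m1 m2 ss acc =
      if ss.any (fun s => (aTriples s).any condT) then .error true else .ok acc := by
  induction ss generalizing acc with
  | nil => simp [aItemLoop]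
  | cons s ss ih =>
    simp only [aItemLoop, aTripLoop_zero]
    by_cases hs : ((aTriples s).any condT) = true <;> simp [hs, ih]

theorem aItemLoop_one (r : Char → Char → Bool) (m1 m2 : Option String)
    (ss : List String) (acc : Bool) :
    aItemLoop r 1 m1 m2 ss acc =
      .ok (acc || ss.any (fun s => (aTriples s).any (fun t => condT t && r t.1.1 t.1.2))) := by
  induction ss generalizing acc with
  | nil => simp [aItemLoop]
  | cons s ss ih =>
    simp [aItemLoop, aTripLoop_one, ih, Bool.or_assoc]

theorem aItemLoop_two (r : Char → Char → Bool) (m1 m2 : Option String)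
    (ss : List String) (acc : Bool) :
    aItemLoop r 2 m1 m2 ss acc =
      if ss.any (fun s => (aTriples s).any (fun t => condT t &&
          (some (String.ofList [t.1.1]) == m2 && some (String.ofList [t.1.2]) == m1))) then
        .error true
      else .ok acc := by
  induction ss generalizing acc with
  | nil => simp [aItemLoop]
  | cons s ss ih =>
    simp only [aItemLoop, aTripLoop_two]
    by_cases hs : ((aTriples s).any (fun t => condT t &&
        (some (String.ofList [t.1.1]) == m2 && some (String.ofList [t.1.2]) == m1))) = true <;>
      simp [hs, ih]

theorem aItemLoop_other (r : Char → Char → Bool) (level : Int) (m1 m2 : Option String)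
    (h0 : level ≠ 0) (h1 : level ≠ 1) (h2 : level ≠ 2)
    (ss : List String) (acc : Bool) :
    aItemLoop r level m1 m2 ss acc = .ok acc := by
  induction ss generalizing acc with
  | nil => simp [aItemLoop]
  | cons s ss ih => simp [aItemLoop, aTripLoop_other r level m1 m2 h0 h1 h2, ih]

-- ----- has_abaGo per level -----

theorem has_abaGo_zero (r : Char → Char → Bool) (items hyper : List String)
    (m1 m2 : Option String) :
    has_abaGo r items hyper 0 m1 m2 = items.any (fun s => (aTriples s).any condT) := by
  unfold has_abaGo
  rw [aItemLoop_zero]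
  by_cases h : (items.any (fun s => (aTriples s).any condT)) = true <;> simp [h]

theorem has_abaGo_one (r : Char → Char → Bool) (items hyper : List String)
    (m1 m2 : Option String) :
    has_abaGo r items hyper 1 m1 m2 =
      items.any (fun s => (aTriples s).any (fun t => condT t && r t.1.1 t.1.2)) := by
  unfold has_abaGo
  rw [aItemLoop_one]
  simp

theorem has_abaGo_two (r : Char → Char → Bool) (items hyper : List String)
    (m1 m2 : Option String) :
    has_abaGo r items hyper 2 m1 m2 =
      items.any (fun s => (aTriples s).any (fun t => condT t &&
        (some (String.ofList [t.1.1]) == m2 && some (String.ofList [t.1.2]) == m1))) := by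
  unfold has_abaGo
  rw [aItemLoop_two]
  by_cases h : (items.any (fun s => (aTriples s).any (fun t => condT t &&
      (some (String.ofList [t.1.1]) == m2 && some (String.ofList [t.1.2]) == m1)))) = true <;>
    simp [h]

theorem has_abaGo_other (r : Char → Char → Bool) (items hyper : List String) (level : Int)
    (m1 m2 : Option String) (h0 : level ≠ 0) (h1 : level ≠ 1) (h2 : level ≠ 2) :
    has_abaGo r items hyper level m1 m2 = false := by
  unfold has_abaGo
  rw [aItemLoop_other r level m1 m2 h0 h1 h2]
  rfl

-- ----- B's pair set, membership view -----

theorem mem_abaPairs (strings : List String) (p : String × String) :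
    p ∈ abaPairs strings ↔
      ∃ s ∈ strings, ∃ t ∈ bTriples s, condT t = true ∧
        p = (String.ofList [t.1.1], String.ofList [t.1.2]) := by
  simp only [abaPairs, abaPairList, PySem.Set.mem_ofList, List.mem_flatMap,
    List.mem_filterMap, Option.ite_none_right_eq_some, Option.some.injEq, condT]
  constructor
  · rintro ⟨s, hs, t, ht, hc, he⟩
    exact ⟨s, hs, t, ht, hc, he.symm⟩
  · rintro ⟨s, hs, t, ht, hc, he⟩
    exact ⟨s, hs, t, ht, hc, he.symm⟩

-- ===== VERDICT (by name: the statement is the Claim_ definition above) =====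
theorem has_aba_spec : Claim_equal_has_aba := by
  intro items hyper level m1 m2 _
  unfold Spec_has_aba has_aba has_aba_alt
  by_cases h0 : level = 0
  · subst h0
    rw [has_abaGo_zero]
    simp only [show ((0 : Int) == 0) = true from rfl, if_true]
    apply Bool.eq_iff_iff.mpr
    simp only [List.any_eq_true, Bool.not_eq_eq_eq_not, Bool.not_true,
      List.isEmpty_eq_false_iff_exists_mem, mem_abaPairs, triples_eq]
    constructor
    · rintro ⟨s, hs, t, ht, hc⟩
      exact ⟨_, s, hs, t, ht, hc, rfl⟩
    · rintro ⟨p, s, hs, t, ht, hc, -⟩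
      exact ⟨s, hs, t, ht, hc⟩
  · by_cases h1 : level = 1
    · subst h1
      rw [has_abaGo_one]
      simp only [has_abaGo_two]
      simp only [show ((1 : Int) == 0) = false from rfl, show ((1 : Int) == 1) = true from rfl,
        Bool.false_eq_true, if_false, if_true]
      apply Bool.eq_iff_iff.mpr
      simp only [List.any_eq_true, Bool.and_eq_true, beq_iff_eq, Option.some.injEq,
        triples_eq, mem_abaPairs, PySem.Set.contains_eq_listContains, List.contains_iff_mem]
      constructor
      · rintro ⟨s, hs, t, ht, hc, s', hs', t', ht', hc', e1, e2⟩
        exact ⟨(String.ofList [t.1.1], String.ofList [t.1.2]), ⟨s, hs, t, ht, hc, rfl⟩,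
          s', hs', t', ht', hc', by simp [e1, e2]⟩
      · rintro ⟨p, ⟨s, hs, t, ht, hc, hp⟩, hmem⟩
        subst hp
        obtain ⟨s', hs', t', ht', hc', he⟩ := hmem
        simp only [Prod.mk.injEq] at he
        exact ⟨s, hs, t, ht, hc, s', hs', t', ht', hc', he.1.symm, he.2.symm⟩
    · by_cases h2 : level = 2
      · subst h2
        rw [has_abaGo_two]
        simp only [show ((2 : Int) == 0) = false from rfl, show ((2 : Int) == 1) = false from rfl,
          show ((2 : Int) == 2) = true from rfl, Bool.false_eq_true, if_false, if_true]
        cases m2 with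
        | none =>
          cases m1 with
          | none => simp
          | some b => simp
        | some a =>
          cases m1 with
          | none => simp
          | some b =>
            apply Bool.eq_iff_iff.mpr
            simp only [List.any_eq_true, Bool.and_eq_true, beq_iff_eq, Option.some.injEq,
              triples_eq, PySem.Set.contains_eq_listContains, List.contains_iff_mem, mem_abaPairs]
            constructor
            · rintro ⟨s, hs, t, ht, hc, e1, e2⟩
              exact ⟨s, hs, t, ht, hc, by simp [e1, e2]⟩
            · rintro ⟨s, hs, t, ht, hc, he⟩
              simp only [Prod.mk.injEq] at he
              exact ⟨s, hs, t, ht, hc, he.1.symm, he.2.symm⟩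
      · rw [has_abaGo_other _ _ _ _ _ _ h0 h1 h2]
        simp [h0, h1, h2]
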